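-- pv_equiv track=rewrite | github.com/Roha-Lee/sw_jungle_algorithm_group_study | Leetcode/561/roha/array_partition_1.py | arrayPairSum
-- ===== SOURCE A (Python) =====
-- from typing import List
--
-- def arrayPairSum(nums: List[int]) -> int:
--     count_arr = [0] * 20001
--
--     for num in nums:
--         count_arr[num + 10000] += 1
--
--     sum_of_min = 0
--     flag = False
--
--     for i in range(20001):
--         while count_arr[i]:
--             if not flag:
--                 sum_of_min += i - 10000
--                 flag = True
--             elif flag:
--                 flag = False
--             count_arr[i] -= 1
--
--     return sum_of_min
-- ===== SOURCE B (Python) =====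
-- def arrayPairSum(nums):
--     def go(s):
--         if not s:
--             return 0
--         return s[0] + go(s[2:])
--     return go(sorted(nums))
-- ===== Notes on version B (the rewrite author's own statement) =====
-- stated objective: simpler
-- what changed: Replaces the fixed 20001-bucket counting array with its toggle-flag emission loop by a comparison sort followed by summing every other element (stride 2) of the sorted list.
-- outside the precondition, e.g. on arrayPairSum([-10001]): A returns 10000, B returns -10001; on arrayPairSum([-30001, -10001]): A returns -10000, B returns -30001; on arrayPairSum([10001]): A raises IndexError, B returns 10001
import Mathlib
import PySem

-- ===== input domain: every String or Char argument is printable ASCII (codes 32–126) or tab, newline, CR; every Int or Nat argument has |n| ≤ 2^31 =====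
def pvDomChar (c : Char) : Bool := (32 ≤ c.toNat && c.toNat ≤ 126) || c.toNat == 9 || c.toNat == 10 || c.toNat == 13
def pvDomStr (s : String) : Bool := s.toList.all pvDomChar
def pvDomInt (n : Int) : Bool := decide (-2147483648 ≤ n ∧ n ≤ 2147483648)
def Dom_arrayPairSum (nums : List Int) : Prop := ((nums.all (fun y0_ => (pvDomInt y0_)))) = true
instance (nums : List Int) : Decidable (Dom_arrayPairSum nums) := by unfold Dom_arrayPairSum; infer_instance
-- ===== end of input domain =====

-- B replaces A's 20001-bucket counting array and toggle flag by sorting and summing every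
-- other element of the sorted list (objective: simpler).

-- ===== PORT A =====
-- 'while count_arr[i]:' decrementing loop; the counts A builds are nonnegative, so
-- recursion on the count's toNat is exact for A's loop.
def pvWhile (v : Int) : Nat → Int × Bool → Int × Bool
  | 0, st => st
  | Nat.succ c, (s, flag) =>
      pvWhile v c (if flag = false then (s + v, true) else (s, false))

-- count_arr[num + 10000] += 1  (Python index semantics via pyGetD/pySetD)
def pvBump (arr : List Int) (num : Int) : List Int :=
  PySem.List.pySetD arr (num + 10000) (PySem.List.pyGetD arr (num + 10000) 0 + 1)

def arrayPairSum (nums : List Int) : Int :=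
  let countArr := nums.foldl pvBump (List.replicate 20001 (0 : Int))
  let st := (PySem.List.pyRange 0 20001 1).foldl
      (fun st i => pvWhile (i - 10000) (PySem.List.pyGetD countArr i 0).toNat st)
      ((0 : Int), false)
  st.1

-- ===== PORT B =====
-- go(s) = 0 if s is empty else s[0] + go(s[2:])   (s[2:] of a singleton is [])
def pvGo : List Int → Int
  | [] => 0
  | [a] => a + pvGo []
  | a :: _ :: t => a + pvGo t

def arrayPairSum_alt (nums : List Int) : Int :=
  pvGo (PySem.List.sorted nums (fun x => x) false)

-- ===== PRECONDITION & SPEC =====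
-- Pre_ keeps the problem's stated value range, every element between -10000 and 10000
-- (LeetCode 561): above 10000 or below -30001 A raises IndexError, and on values between
-- -30001 and -10001 A still returns, but the value is an accident of Python's
-- negative-index wraparound into the 20001-slot bucket array.
def Pre_arrayPairSum (nums : List Int) : Prop := ∀ x ∈ nums, -10000 ≤ x ∧ x ≤ 10000
instance (nums : List Int) : Decidable (Pre_arrayPairSum nums) := by unfold Pre_arrayPairSum; infer_instance
def pvWitness_arrayPairSum : List Int := [3, 1, 2, 4]

def Spec_arrayPairSum (nums : List Int) (out : Int) : Prop := out = arrayPairSum_alt nums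
instance (nums : List Int) (out : Int) : Decidable (Spec_arrayPairSum nums out) := by unfold Spec_arrayPairSum; infer_instance

-- ===== CLAIM (what is proved, stated in full; the proofs are below) =====
def Claim_equal_arrayPairSum : Prop := ∀ (nums : List Int), Dom_arrayPairSum nums → Pre_arrayPairSum nums → Spec_arrayPairSum nums (arrayPairSum nums)

-- ===== LEMMAS AND PROOFS =====

-- the body of A's inner while loop as a fold step over the emitted value stream
def pvStep (st : Int × Bool) (v : Int) : Int × Bool :=
  if st.2 = false then (st.1 + v, true) else (st.1, false)

-- the value stream a count array emits: count[0] copies of v, count[1] copies of v+1, …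
def pvEmit : Int → List Int → List Int
  | _, [] => []
  | v, c :: rest => List.replicate c.toNat v ++ pvEmit (v + 1) rest

lemma pvWhile_eq_foldl (v : Int) (c : Nat) (st : Int × Bool) :
    pvWhile v c st = (List.replicate c v).foldl pvStep st := by
  induction c generalizing st with
  | zero => simp [pvWhile]
  | succ n ih =>
      obtain ⟨s, flag⟩ := st
      simp [pvWhile, List.replicate_succ, ih, pvStep]

lemma foldl_pvStep_pvGo (l : List Int) : ∀ s : Int, (l.foldl pvStep (s, false)).1 = s + pvGo l := by
  induction l using pvGo.induct with
  | case1 => simp [pvGo]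
  | case2 a => intro s; simp [pvStep, pvGo]
  | case3 a b t ih => intro s; simp [pvStep, pvGo, ih, add_assoc]

lemma pvEmit_mem_ge (arr : List Int) : ∀ (v : Int), ∀ x ∈ pvEmit v arr, v ≤ x := by
  induction arr with
  | nil => intro v x hx; simp [pvEmit] at hx
  | cons c rest ih =>
      intro v x hx
      simp only [pvEmit, List.mem_append] at hx
      rcases hx with hx | hx
      · simp [List.eq_of_mem_replicate hx]
      · have := ih (v + 1) x hx; omega

lemma pvEmit_pairwise (arr : List Int) : ∀ v : Int, (pvEmit v arr).Pairwise (· ≤ ·) := by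
  induction arr with
  | nil => intro v; simp [pvEmit]
  | cons c rest ih =>
      intro v
      simp only [pvEmit]
      rw [List.pairwise_append]
      refine ⟨List.pairwise_replicate.2 (by simp), ih (v + 1), ?_⟩
      intro a ha b hb
      have ha' := List.eq_of_mem_replicate ha
      have hb' := pvEmit_mem_ge rest (v + 1) b hb
      omega

lemma pvEmit_replicate_zero (n : Nat) : ∀ v : Int, pvEmit v (List.replicate n 0) = [] := by
  induction n with
  | zero => intro v; simp [pvEmit]
  | succ m ih => intro v; simp [pvEmit, List.replicate_succ, ih]

lemma pvEmit_set (arr : List Int) : ∀ (j : Nat) (v : Int), j < arr.length → 0 ≤ arr.getD j 0 →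
    (pvEmit v (arr.set j (arr.getD j 0 + 1))).Perm ((v + j) :: pvEmit v arr) := by
  induction arr with
  | nil => intro j v hj _; simp at hj
  | cons c rest ih =>
      intro j v hj hc
      cases j with
      | zero =>
          simp only [List.set, List.getD_cons_zero] at *
          have : (c + 1).toNat = c.toNat + 1 := by omega
          simp [pvEmit, this, List.replicate_succ]
      | succ j' =>
          simp only [List.set, List.getD_cons_succ] at *
          have hj' : j' < rest.length := by simpa using hj
          have hperm := ih j' (v + 1) hj' hc
          have step1 : (pvEmit v (c :: rest.set j' (rest.getD j' 0 + 1))).Perm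
              (List.replicate c.toNat v ++ ((v + 1 + (j' : Int)) :: pvEmit (v + 1) rest)) := by
            simp only [pvEmit]
            exact List.Perm.append_left _ hperm
          have step2 : (List.replicate c.toNat v ++ ((v + 1 + (j' : Int)) :: pvEmit (v + 1) rest)).Perm
              ((v + 1 + (j' : Int)) :: (List.replicate c.toNat v ++ pvEmit (v + 1) rest)) :=
            List.perm_middle
          have hval : v + 1 + (j' : Int) = v + ((j' + 1 : Nat) : Int) := by push_cast; ring
          have : ((v + 1 + (j' : Int)) :: (List.replicate c.toNat v ++ pvEmit (v + 1) rest))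
              = (v + ((j' + 1 : Nat) : Int)) :: pvEmit v (c :: rest) := by
            rw [hval]; simp [pvEmit]
          exact (step1.trans step2).trans (this ▸ List.Perm.refl _)

lemma pvBump_reduce (arr : List Int) (x : Int) (hx : -10000 ≤ x ∧ x ≤ 10000)
    (hlen : arr.length = 20001) :
    pvBump arr x = arr.set (x + 10000).toNat (arr.getD (x + 10000).toNat 0 + 1) := by
  have hj : (x + 10000) = (((x + 10000).toNat : Nat) : Int) := by omega
  have hlt : (x + 10000).toNat < arr.length := by omega
  have hcond : x + 10000 < (arr.length : Int) := by omega
  have h0 : (0 : Int) ≤ x + 10000 := by omega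
  rw [pvBump, hj, PySem.List.pyGetD_natCast]
  simp [PySem.List.pySetD, PySem.List.pySet?, PySem.List.pyIdx?, hlt, hcond, h0]

lemma fold_length (nums : List Int) : ∀ arr : List Int,
    (∀ x ∈ nums, -10000 ≤ x ∧ x ≤ 10000) → arr.length = 20001 →
    (nums.foldl pvBump arr).length = 20001 := by
  induction nums with
  | nil => intro arr _ h; simpa using h
  | cons x rest ih =>
      intro arr hpre hlen
      rw [List.foldl_cons]
      refine ih _ (fun y hy => hpre y (List.mem_cons_of_mem _ hy)) ?_
      rw [pvBump_reduce arr x (hpre x (List.mem_cons_self)) hlen]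
      simpa using hlen

lemma fold_perm (nums : List Int) : ∀ arr : List Int,
    (∀ x ∈ nums, -10000 ≤ x ∧ x ≤ 10000) → arr.length = 20001 → (∀ c ∈ arr, 0 ≤ c) →
    (pvEmit (-10000) (nums.foldl pvBump arr)).Perm (nums ++ pvEmit (-10000) arr) := by
  induction nums with
  | nil => intro arr _ _ _; simp
  | cons x rest ih =>
      intro arr hpre hlen hnn
      have hx := hpre x (List.mem_cons_self)
      have hbump := pvBump_reduce arr x hx hlen
      have hlen' : (pvBump arr x).length = 20001 := by rw [hbump]; simpa using hlen
      have hnn' : ∀ c ∈ pvBump arr x, 0 ≤ c := by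
        rw [hbump]
        intro c hc
        rcases List.mem_or_eq_of_mem_set hc with h | h
        · exact hnn c h
        · have hd : 0 ≤ arr.getD (x + 10000).toNat 0 := by
            rcases Nat.lt_or_ge (x + 10000).toNat arr.length with hlt | hge
            · rw [List.getD_eq_getElem arr 0 hlt]
              exact hnn _ (List.getElem_mem hlt)
            · rw [List.getD_eq_default arr 0 hge]
          omega
      rw [List.foldl_cons]
      have hrest := ih (pvBump arr x) (fun y hy => hpre y (List.mem_cons_of_mem _ hy)) hlen' hnn'
      have hset : (pvEmit (-10000) (pvBump arr x)).Perm (x :: pvEmit (-10000) arr) := by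
        rw [hbump]
        have hlt : (x + 10000).toNat < arr.length := by omega
        have hd : 0 ≤ arr.getD (x + 10000).toNat 0 := by
          rw [List.getD_eq_getElem arr 0 hlt]
          exact hnn _ (List.getElem_mem hlt)
        have h := pvEmit_set arr (x + 10000).toNat (-10000) hlt hd
        have hv : (-10000 : Int) + ((x + 10000).toNat : Int) = x := by omega
        rwa [hv] at h
      exact hrest.trans ((List.Perm.append_left rest hset).trans List.perm_middle)

lemma outer_fold (arr : List Int) : ∀ (v : Int) (st : Int × Bool),
    (List.range arr.length).foldl
      (fun st k => (List.replicate (arr.getD k 0).toNat (v + (k : Int))).foldl pvStep st) st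
    = (pvEmit v arr).foldl pvStep st := by
  induction arr with
  | nil => intro v st; simp [pvEmit]
  | cons c rest ih =>
      intro v st
      rw [List.length_cons, List.range_succ_eq_map, List.foldl_cons, List.foldl_map]
      simp only [List.getD_cons_zero, Nat.cast_zero, add_zero]
      rw [PySem.List.foldl_congr_mem _ _
        (fun st k => (List.replicate (rest.getD k 0).toNat ((v + 1) + (k : Int))).foldl pvStep st)
        _ (by
          intro acc k _
          have hv : v + ((Nat.succ k : Nat) : Int) = (v + 1) + (k : Int) := by
            omega
          rw [List.getD_cons_succ, hv])]
      rw [ih (v + 1)]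
      simp only [pvEmit, List.foldl_append]

-- ===== VERDICT (by name: the statement is the Claim_ definition above) =====
theorem arrayPairSum_spec : Claim_equal_arrayPairSum := by
  intro nums _ hpre
  unfold Spec_arrayPairSum arrayPairSum arrayPairSum_alt
  have hlen0 : (List.replicate 20001 (0 : Int)).length = 20001 := List.length_replicate
  have hnn0 : ∀ c ∈ List.replicate 20001 (0 : Int), (0 : Int) ≤ c := by
    intro c hc; simp [List.eq_of_mem_replicate hc]
  have hpre' : ∀ x ∈ nums, -10000 ≤ x ∧ x ≤ 10000 := hpre
  have hlen : (nums.foldl pvBump (List.replicate 20001 (0 : Int))).length = 20001 :=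
    fold_length nums _ hpre' hlen0
  have hperm : (pvEmit (-10000) (nums.foldl pvBump (List.replicate 20001 (0 : Int)))).Perm nums := by
    have h := fold_perm nums _ hpre' hlen0 hnn0
    rwa [pvEmit_replicate_zero 20001 (-10000), List.append_nil] at h
  have hsorted : PySem.List.sorted nums (fun x => x) false
      = pvEmit (-10000) (nums.foldl pvBump (List.replicate 20001 (0 : Int))) :=
    PySem.List.sorted_id_eq_of_perm_of_pairwise _ _ hperm
      (pvEmit_pairwise _ (-10000))
  rw [hsorted]
  dsimp only
  rw [PySem.List.pyRange_one 0 20001]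
  have h20001 : ((20001 : Int) - 0).toNat = 20001 := by decide
  rw [h20001, List.foldl_map]
  rw [PySem.List.foldl_congr_mem _ _
    (fun st k => (List.replicate
        ((nums.foldl pvBump (List.replicate 20001 (0 : Int))).getD k 0).toNat
        ((-10000 : Int) + (k : Int))).foldl pvStep st)
    _ (by
      intro acc k _
      rw [pvWhile_eq_foldl]
      have h1 : (0 : Int) + (k : Int) = ((k : Nat) : Int) := by ring
      have h2 : (0 : Int) + (k : Int) - 10000 = (-10000 : Int) + (k : Int) := by ring
      rw [h2, h1, PySem.List.pyGetD_natCast])]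
  have houter := outer_fold (nums.foldl pvBump (List.replicate 20001 (0 : Int)))
      (-10000) ((0 : Int), false)
  rw [hlen] at houter
  rw [houter]
  have := foldl_pvStep_pvGo
    (pvEmit (-10000) (nums.foldl pvBump (List.replicate 20001 (0 : Int)))) 0
  rw [this]
  ring
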